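-- pv_equiv track=rewrite | github.com/thewhatifproject/project_heru | apps/backend/app/pipeline/distributed_causal_wan_runtime.py | _resolve_block_intervals
-- ===== SOURCE A (Python) =====
-- def _resolve_block_intervals(total_blocks: int, world_size: int) -> list[list[int]]:
--     if world_size == 2:
--         split = max(1, min(total_blocks - 1, total_blocks // 2))
--         return [[0, split], [split, total_blocks]]
--
--     base = total_blocks // world_size
--     rem = total_blocks % world_size
--     start = 0
--     intervals: list[list[int]] = []
--     for rank in range(world_size):
--         size = base + (1 if rank < rem else 0)
--         end = start + size if rank < world_size - 1 else total_blocks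
--         intervals.append([start, end])
--         start = end
--     return intervals
-- ===== SOURCE B (Python) =====
-- def _resolve_block_intervals(total_blocks: int, world_size: int) -> list[list[int]]:
--     if world_size == 2:
--         split = max(1, min(total_blocks - 1, total_blocks // 2))
--         return [[0, split], [split, total_blocks]]
--
--     base = total_blocks // world_size
--     rem = total_blocks % world_size
--     lo = lambda r: r * base + min(r, rem)
--     return [[lo(r), lo(r + 1)] for r in range(world_size)]
-- ===== Notes on version B (the rewrite author's own statement) =====
-- stated objective: simpler
-- what changed: Replaces the running `start` accumulator loop (with its special last-rank `else total_blocks` branch) by a closed-form boundary lo(r) = r*base + min(r, rem) and a single comprehension over range(world_size); the ws==2 special case is kept verbatim.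
-- outside the precondition, e.g. on _resolve_block_intervals(10, 0): A raises ZeroDivisionError, B raises ZeroDivisionError
import Mathlib
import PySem

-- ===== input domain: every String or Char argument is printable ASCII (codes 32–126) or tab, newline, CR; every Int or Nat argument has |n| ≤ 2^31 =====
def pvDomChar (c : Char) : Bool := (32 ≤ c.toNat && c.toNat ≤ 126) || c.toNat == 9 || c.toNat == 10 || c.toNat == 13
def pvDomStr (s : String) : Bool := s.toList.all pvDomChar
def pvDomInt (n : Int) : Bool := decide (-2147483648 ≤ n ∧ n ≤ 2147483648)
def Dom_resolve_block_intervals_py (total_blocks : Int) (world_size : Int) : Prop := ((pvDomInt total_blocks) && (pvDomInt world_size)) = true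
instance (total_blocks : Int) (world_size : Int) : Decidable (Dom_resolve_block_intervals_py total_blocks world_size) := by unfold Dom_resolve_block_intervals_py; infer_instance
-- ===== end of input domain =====

-- B replaces A's running `start` accumulator with the closed-form boundary lo(r) = r*base + min(r, rem); same cost, simpler (objective: simpler).

-- ===== PORT A =====
-- literal transliteration of A: ws == 2 special case, then a foldl carrying (start, intervals)
def resolve_block_intervals_py (total_blocks : Int) (world_size : Int) : List (List Int) :=
  if world_size == 2 then
    let split := max 1 (min (total_blocks - 1) (PySem.Int.floordiv total_blocks 2))
    [[0, split], [split, total_blocks]]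
  else
    let base := PySem.Int.floordiv total_blocks world_size
    let rem := PySem.Int.mod total_blocks world_size
    let st := (PySem.List.pyRange 0 world_size 1).foldl
      (fun (st : Int × List (List Int)) rank =>
        let size := base + (if rank < rem then 1 else 0)
        let e := if rank < world_size - 1 then st.1 + size else total_blocks
        (e, st.2 ++ [[st.1, e]])) (0, [])
    st.2

-- ===== PORT B =====
-- literal transliteration of B: same ws == 2 branch, then a map over range(ws) with closed-form boundaries
def resolve_block_intervals_py_alt (total_blocks : Int) (world_size : Int) : List (List Int) :=
  if world_size == 2 then
    let split := max 1 (min (total_blocks - 1) (PySem.Int.floordiv total_blocks 2))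
    [[0, split], [split, total_blocks]]
  else
    let base := PySem.Int.floordiv total_blocks world_size
    let rem := PySem.Int.mod total_blocks world_size
    let lo := fun (r : Int) => r * base + min r rem
    (PySem.List.pyRange 0 world_size 1).map (fun r => [lo r, lo (r + 1)])

-- ===== PRECONDITION & SPEC =====
-- Pre_ excludes only world_size = 0, where A raises ZeroDivisionError (total_blocks // 0).
def Pre_resolve_block_intervals_py (total_blocks : Int) (world_size : Int) : Prop := world_size ≠ 0
instance (total_blocks : Int) (world_size : Int) : Decidable (Pre_resolve_block_intervals_py total_blocks world_size) := by unfold Pre_resolve_block_intervals_py; infer_instance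
def pvWitness_resolve_block_intervals_py : Int × Int := (10, 3)

def Spec_resolve_block_intervals_py (total_blocks : Int) (world_size : Int) (out : List (List Int)) : Prop := out = resolve_block_intervals_py_alt total_blocks world_size
instance (total_blocks : Int) (world_size : Int) (out : List (List Int)) : Decidable (Spec_resolve_block_intervals_py total_blocks world_size out) := by unfold Spec_resolve_block_intervals_py; infer_instance

-- ===== CLAIM (what is proved, stated in full; the proofs are below) =====
def Claim_equal_resolve_block_intervals_py : Prop := ∀ (total_blocks : Int) (world_size : Int), Dom_resolve_block_intervals_py total_blocks world_size → Pre_resolve_block_intervals_py total_blocks world_size → Spec_resolve_block_intervals_py total_blocks world_size (resolve_block_intervals_py total_blocks world_size)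

-- ===== LEMMAS AND PROOFS =====

-- Invariant: folding A's step over range(0, k) (all ranks strictly before the last one)
-- yields start = lo k and the first k closed-form intervals.
theorem pv_fold_invariant (total ws : Int) (hws : 0 < ws) (k : Nat) (hk : (k : Int) ≤ ws - 1) :
    (PySem.List.pyRange 0 (k : Int) 1).foldl
      (fun (st : Int × List (List Int)) rank =>
        (if rank < ws - 1 then st.1 + (PySem.Int.floordiv total ws + if rank < PySem.Int.mod total ws then 1 else 0) else total,
         st.2 ++ [[st.1, if rank < ws - 1 then st.1 + (PySem.Int.floordiv total ws + if rank < PySem.Int.mod total ws then 1 else 0) else total]])) (0, [])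
    = ((k : Int) * PySem.Int.floordiv total ws + min (k : Int) (PySem.Int.mod total ws),
       (PySem.List.pyRange 0 (k : Int) 1).map (fun r =>
         [r * PySem.Int.floordiv total ws + min r (PySem.Int.mod total ws),
          (r + 1) * PySem.Int.floordiv total ws + min (r + 1) (PySem.Int.mod total ws)])) := by
  induction k with
  | zero =>
    simp [PySem.List.pyRange_one_eq_nil (le_refl (0:Int)),
          min_eq_left (PySem.Int.mod_nonneg total hws)]
  | succ n ih =>
    have hn : (n : Int) ≤ ws - 1 := by push_cast at hk ⊢; omega
    have hcast : ((n + 1 : Nat) : Int) = (n : Int) + 1 := by push_cast; ring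
    rw [hcast, PySem.List.pyRange_one_succ_right (Int.natCast_nonneg n), List.foldl_append, ih hn,
        List.map_append]
    have hrem0 : 0 ≤ PySem.Int.mod total ws := PySem.Int.mod_nonneg total hws
    have hlt : (n : Int) < ws - 1 := by push_cast at hk; omega
    simp only [List.foldl_cons, List.foldl_nil, List.map_cons, List.map_nil, if_pos hlt]
    have hstep : (n : Int) * PySem.Int.floordiv total ws + min (n : Int) (PySem.Int.mod total ws)
        + (PySem.Int.floordiv total ws + if (n : Int) < PySem.Int.mod total ws then 1 else 0)
        = ((n : Int) + 1) * PySem.Int.floordiv total ws + min ((n : Int) + 1) (PySem.Int.mod total ws) := by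
      by_cases h : (n : Int) < PySem.Int.mod total ws
      · rw [if_pos h, min_eq_left (by omega), min_eq_left (by omega)]; ring
      · rw [if_neg h, min_eq_right (by omega), min_eq_right (by omega)]; ring
    rw [hstep]

-- ===== VERDICT (by name: the statement is the Claim_ definition above) =====
theorem resolve_block_intervals_py_spec : Claim_equal_resolve_block_intervals_py := by
  intro total ws _ hws
  unfold Spec_resolve_block_intervals_py resolve_block_intervals_py resolve_block_intervals_py_alt
  by_cases h2 : ws == 2
  · simp [h2]
  · simp only [h2, if_false, Bool.false_eq_true]
    rcases lt_or_ge 0 ws with hpos | hneg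
    · -- positive world size: split off the last rank and use the invariant
      obtain ⟨n, hn⟩ : ∃ n : Nat, (n : Int) = ws - 1 := ⟨(ws - 1).toNat, by omega⟩
      have hsplit : PySem.List.pyRange 0 ws 1 = PySem.List.pyRange 0 (n : Int) 1 ++ [(n : Int)] := by
        rw [show ws = (n : Int) + 1 from by omega,
            PySem.List.pyRange_one_succ_right (Int.natCast_nonneg n)]
      rw [hsplit, List.foldl_append, List.map_append,
          pv_fold_invariant total ws hpos n (by omega)]
      have hremlt : PySem.Int.mod total ws < ws := PySem.Int.mod_lt total hpos
      have hrem0 : 0 ≤ PySem.Int.mod total ws := PySem.Int.mod_nonneg total hpos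
      simp only [List.foldl_cons, List.foldl_nil, List.map_cons, List.map_nil]
      rw [if_neg (show ¬((n : Int) < ws - 1) by omega)]
      have hend : ((n : Int) + 1) * PySem.Int.floordiv total ws
          + min ((n : Int) + 1) (PySem.Int.mod total ws) = total := by
        rw [min_eq_right (by omega), show ((n : Int) + 1) = ws from by omega, mul_comm]
        exact PySem.Int.floordiv_mul_add_mod total ws
      rw [hend]
    · -- nonpositive world size: the range is empty on both sides
      rw [PySem.List.pyRange_one_eq_nil (by omega)]
      simp
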